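-- pv_equiv track=rewrite | github.com/Jobin-Nelson/learn | competitive_programming/2025/february/find-the-number-of-distinct-colors-among-the-balls.py | queryResults
-- ===== SOURCE A (Python) =====
-- def queryResults(limit: int, queries: list[list[int]]) -> list[int]:
--     res = [0] * len(queries)
--     color_map = {}
--     ball_map = {}
--
--     for i, (b, c) in enumerate(queries):
--         if b in ball_map:
--             prev_color = ball_map[b]
--             color_map[prev_color] -= 1
--
--             if color_map[prev_color] == 0:
--                 del color_map[prev_color]
--         ball_map[b] = c
--         color_map[c] = color_map.get(c, 0) + 1
--         res[i] = len(color_map)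
--     return res
-- ===== SOURCE B (Python) =====
-- def queryResults(limit: int, queries: list[list[int]]) -> list[int]:
--     ball_map = {}
--     res = []
--     for b, c in queries:
--         ball_map[b] = c
--         res.append(len(set(ball_map.values())))
--     return res
-- ===== Notes on version B (the rewrite author's own statement) =====
-- stated objective: simpler
-- what changed: Drops the incremental color-count dictionary with its decrement/delete branch; keeps only the ball-to-color map and recomputes the number of distinct colors by a fresh set of its values after each query.
import Mathlib
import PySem

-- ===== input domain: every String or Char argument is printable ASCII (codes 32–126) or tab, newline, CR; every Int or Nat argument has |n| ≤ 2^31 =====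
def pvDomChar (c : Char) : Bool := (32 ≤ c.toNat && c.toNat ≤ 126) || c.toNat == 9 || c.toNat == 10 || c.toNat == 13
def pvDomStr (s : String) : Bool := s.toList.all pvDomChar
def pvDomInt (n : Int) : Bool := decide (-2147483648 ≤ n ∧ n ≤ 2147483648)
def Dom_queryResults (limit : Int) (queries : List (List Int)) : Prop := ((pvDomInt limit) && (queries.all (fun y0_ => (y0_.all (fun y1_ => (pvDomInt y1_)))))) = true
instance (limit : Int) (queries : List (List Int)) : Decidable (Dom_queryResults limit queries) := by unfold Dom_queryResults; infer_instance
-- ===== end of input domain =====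

-- B drops A's incremental color-count dict (and its decrement/delete branch) and recomputes
-- the number of distinct colors from the ball→color map after each query: simpler, not faster.


-- ===== PORT A =====
-- color_map update of one iteration (the decrement / delete-on-zero branch, then the increment);
-- `color_map[prev_color] -= 1` is ported as `modify prev 0 (· - 1)`: on every state the loop
-- reaches, prev is a key of color_map, so the default 0 is never used and the port is exact.
def updA (cm bm : PySem.Dict Int Int) (b c : Int) : PySem.Dict Int Int :=
  let cm' :=
    if bm.contains b then
      let prev := bm.getD b 0
      let cm1 := cm.modify prev 0 (· - 1)
      if cm1.getD prev 0 = 0 then cm1.erase prev else cm1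
    else cm
  cm'.insert c (cm'.getD c 0 + 1)

-- one iteration of A's `for i, (b, c) in enumerate(queries)` loop; inner lists of length ≠ 2
-- (where Python's unpacking raises ValueError) are excluded by Pre_ and leave the state unchanged
def stepA (st : List Int × PySem.Dict Int Int × PySem.Dict Int Int) (p : Int × List Int) :
    List Int × PySem.Dict Int Int × PySem.Dict Int Int :=
  match p.2 with
  | [b, c] =>
      let cm := updA st.2.1 st.2.2 b c
      let bm := st.2.2.insert b c
      (PySem.List.pySetD st.1 p.1 (cm.size : Int), cm, bm)
  | _ => st

def queryResults (limit : Int) (queries : List (List Int)) : List Int :=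
  ((PySem.List.enumerate queries 0).foldl stepA
    (List.replicate queries.length 0, PySem.Dict.empty, PySem.Dict.empty)).1

-- ===== PORT B =====
-- one iteration of B's loop: assign the ball, append len(set(ball_map.values()))
def stepB (st : PySem.Dict Int Int × List Int) (q : List Int) :
    PySem.Dict Int Int × List Int :=
  match q with
  | [b, c] =>
      let bm := st.1.insert b c
      (bm, st.2 ++ [((PySem.Set.ofList bm.values).length : Int)])
  | _ => st

def queryResults_alt (limit : Int) (queries : List (List Int)) : List Int :=
  (queries.foldl stepB (PySem.Dict.empty, [])).2

-- ===== PRECONDITION & SPEC =====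
-- Pre_ excludes exactly the inputs where Python's tuple unpacking `(b, c) = query`
-- raises ValueError (an inner list whose length is not 2); A raises there, so nothing is claimed.
def Pre_queryResults (limit : Int) (queries : List (List Int)) : Prop :=
  ∀ q ∈ queries, q.length = 2
instance (limit : Int) (queries : List (List Int)) : Decidable (Pre_queryResults limit queries) := by
  unfold Pre_queryResults; infer_instance
def pvWitness_queryResults : Int × List (List Int) := (4, [[1, 4], [2, 5], [1, 3], [3, 4]])

def Spec_queryResults (limit : Int) (queries : List (List Int)) (out : List Int) : Prop :=
  out = queryResults_alt limit queries
instance (limit : Int) (queries : List (List Int)) (out : List Int) : Decidable (Spec_queryResults limit queries out) := by unfold Spec_queryResults; infer_instance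

-- ===== CLAIM (what is proved, stated in full; the proofs are below) =====
def Claim_equal_queryResults : Prop := ∀ (limit : Int) (queries : List (List Int)), Dom_queryResults limit queries → Pre_queryResults limit queries → Spec_queryResults limit queries (queryResults limit queries)

-- ===== LEMMAS AND PROOFS =====

-- the coupling invariant: color_map stores exactly the positive value-counts of ball_map
def InvAB (cm bm : PySem.Dict Int Int) : Prop :=
  cm.keys.Nodup ∧ bm.keys.Nodup ∧
  (∀ v, cm.getD v 0 = (bm.values.count v : Int)) ∧
  (∀ v, v ∈ cm.keys ↔ 0 < bm.values.count v)


theorem find?_filter_ne (l : List (Int × Int)) (k v : Int) (h : v ≠ k) :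
    List.find? (fun p => p.1 == v) (l.filter (fun p => !(p.1 == k)))
      = List.find? (fun p => p.1 == v) l := by
  induction l with
  | nil => rfl
  | cons p t ih =>
    by_cases hp : p.1 = k
    · simp [hp, Ne.symm h, ih]
    · by_cases hv : p.1 = v
      · simp [hv, h]
      · simp [hp, hv, ih]

theorem get?_erase (d : PySem.Dict Int Int) (k v : Int) :
    (d.erase k).get? v = if v = k then none else d.get? v := by
  by_cases h : v = k
  · subst h
    simp only [PySem.Dict.erase, PySem.Dict.get?]
    rw [List.find?_eq_none.2]
    · rfl
    · intro p hp
      simp only [List.mem_filter] at hp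
      simpa using hp.2
  · simp only [PySem.Dict.erase, PySem.Dict.get?, if_neg h]
    rw [find?_filter_ne _ _ _ h]

theorem keys_erase (d : PySem.Dict Int Int) (k : Int) :
    (d.erase k).keys = d.keys.filter (fun x => !(x == k)) := by
  simp only [PySem.Dict.erase, PySem.Dict.keys]
  induction d.items with
  | nil => rfl
  | cons p t ih => by_cases hp : p.1 = k <;> simp [hp, ih]

theorem getD_mem_values (d : PySem.Dict Int Int) (b : Int)
    (h : d.contains b = true) : d.getD b 0 ∈ d.values := by
  rw [PySem.Dict.contains_eq_isSome_get?] at h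
  obtain ⟨v, hv⟩ := Option.isSome_iff_exists.1 h
  have hg : d.getD b 0 = v := by simp [PySem.Dict.getD_eq_get?_getD, hv]
  rw [hg]
  have := PySem.Dict.mem_items_of_get?_eq_some d hv
  simp only [PySem.Dict.values]
  exact List.mem_map.2 ⟨(b, v), this, rfl⟩

theorem count_values_insert_fresh (bm : PySem.Dict Int Int) (b c v : Int)
    (h : bm.contains b = false) :
    (bm.insert b c).values.count v = bm.values.count v + (if c = v then 1 else 0) := by
  simp only [PySem.Dict.values, PySem.Dict.items_insert_of_not_contains _ _ h,
    List.map_append, List.count_append, List.map_cons, List.map_nil]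
  by_cases h1 : c = v
  · subst h1; simp
  · simp [h1]


theorem getD_erase (d : PySem.Dict Int Int) (k v d0 : Int) :
    (d.erase k).getD v d0 = if v = k then d0 else d.getD v d0 := by
  simp [PySem.Dict.getD_eq_get?_getD, get?_erase]
  split_ifs <;> simp

theorem mem_keys_erase (d : PySem.Dict Int Int) (k v : Int) :
    v ∈ (d.erase k).keys ↔ v ∈ d.keys ∧ v ≠ k := by
  simp [keys_erase]

theorem nodup_keys_erase (d : PySem.Dict Int Int) (k : Int) (h : d.keys.Nodup) :
    (d.erase k).keys.Nodup := by
  rw [keys_erase]; exact h.filter _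

theorem count_map_snd_update (b c prev v : Int) (l : List (Int × Int))
    (hnd : (l.map Prod.fst).Nodup) (hmem : (b, prev) ∈ l) :
    ((l.map (fun p => if p.1 == b then (b, c) else p)).map Prod.snd).count v
        + (if prev = v then 1 else 0)
      = (l.map Prod.snd).count v + (if c = v then 1 else 0) := by
  induction l with
  | nil => simp at hmem
  | cons p t ih =>
    simp only [List.map_cons, List.nodup_cons, List.mem_map] at hnd
    by_cases hb : p.1 = b
    · have hpeq : p = (b, prev) := by
        rcases List.mem_cons.1 hmem with h | h
        · exact h.symm
        · exact absurd ⟨(b, prev), h, hb.symm ▸ rfl⟩ hnd.1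
      have htid : t.map (fun p => if p.1 == b then (b, c) else p) = t := by
        have : t.map (fun p => if p.1 == b then (b, c) else p) = t.map id := by
          apply List.map_congr_left
          intro q hq
          have : q.1 ≠ b := by
            intro hqb
            exact hnd.1 ⟨q, hq, by rw [hqb, hb]⟩
          simp [this]
        rw [this, List.map_id]
      subst hpeq
      simp only [List.map_cons, htid, beq_self_eq_true, List.count_cons]
      by_cases h1 : prev = v <;> by_cases h2 : c = v <;> simp [h1, h2]
    · have hmem' : (b, prev) ∈ t := by
        rcases List.mem_cons.1 hmem with h | h
        · exact absurd (congrArg Prod.fst h.symm) hb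
        · exact h
      have := ih hnd.2 hmem'
      have hbf : (p.1 == b) = false := by simp [hb]
      simp only [List.map_cons, hbf, Bool.false_eq_true, if_false, List.count_cons]
      omega

theorem count_values_insert_overwrite (bm : PySem.Dict Int Int) (b c v : Int)
    (hnd : bm.keys.Nodup) (h : bm.contains b = true) :
    (bm.insert b c).values.count v + (if bm.getD b 0 = v then 1 else 0)
      = bm.values.count v + (if c = v then 1 else 0) := by
  rw [PySem.Dict.contains_eq_isSome_get?] at h
  obtain ⟨w, hw⟩ := Option.isSome_iff_exists.1 h
  have hg : bm.getD b 0 = w := by simp [PySem.Dict.getD_eq_get?_getD, hw]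
  have hmem : (b, w) ∈ bm.items := PySem.Dict.mem_items_of_get?_eq_some bm hw
  have hc : bm.contains b = true := by
    rw [PySem.Dict.contains_eq_isSome_get?, hw]; rfl
  simp only [PySem.Dict.values, PySem.Dict.items_insert_of_contains _ _ hc, hg]
  exact count_map_snd_update b c w v bm.items hnd hmem

theorem Inv_upd (cm bm : PySem.Dict Int Int) (b c : Int) (h : InvAB cm bm) :
    InvAB (updA cm bm b c) (bm.insert b c) := by
  obtain ⟨h1, h2, h3, h4⟩ := h
  by_cases hcb : bm.contains b = true
  · -- overwrite case
    set prev := bm.getD b 0 with hprev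
    have hprevpos : 0 < bm.values.count prev :=
      List.count_pos_iff.2 (getD_mem_values bm b hcb)
    have hcnt : ∀ v, (bm.insert b c).values.count v + (if prev = v then 1 else 0)
        = bm.values.count v + (if c = v then 1 else 0) := by
      intro v
      have := count_values_insert_overwrite bm b c v h2 hcb
      rwa [← hprev] at this
    set cm1 := cm.modify prev 0 (· - 1) with hcm1
    have g1 : ∀ v, cm1.getD v 0
        = if v = prev then (bm.values.count prev : Int) - 1 else (bm.values.count v : Int) := by
      intro v
      rw [hcm1, PySem.Dict.getD_modify]
      split_ifs with hv <;> simp [h3]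
    have k1 : ∀ v, v ∈ cm1.keys ↔ v ∈ cm.keys := by
      intro v
      rw [hcm1, PySem.Dict.keys_modify, PySem.Dict.mem_keys_insert]
      constructor
      · rintro (rfl | hv)
        · exact (h4 _).2 hprevpos
        · exact hv
      · exact Or.inr
    have n1 : cm1.keys.Nodup := by
      rw [hcm1, PySem.Dict.keys_modify]
      exact PySem.Dict.nodup_keys_insert _ _ _ h1
    set cm2 := if cm1.getD prev 0 = 0 then cm1.erase prev else cm1 with hcm2
    have g2 : ∀ v, cm2.getD v 0
        = if v = prev then (bm.values.count prev : Int) - 1 else (bm.values.count v : Int) := by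
      intro v
      rw [hcm2]
      by_cases hz : cm1.getD prev 0 = 0
      · have hone : (bm.values.count prev : Int) - 1 = 0 := by
          have := g1 prev
          rw [hz] at this
          simpa using this.symm
        rw [if_pos hz, getD_erase]
        split_ifs with hv
        · omega
        · rw [g1 v, if_neg hv]
      · rw [if_neg hz]; exact g1 v
    have k2 : ∀ v, v ∈ cm2.keys
        ↔ (if v = prev then 1 < bm.values.count prev else 0 < bm.values.count v) := by
      intro v
      rw [hcm2]
      by_cases hz : cm1.getD prev 0 = 0
      · have hone : bm.values.count prev = 1 := by
          have := g1 prev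
          rw [hz] at this
          omega
        rw [if_pos hz, mem_keys_erase, k1, h4]
        split_ifs with hv
        · simp [hv, hone]
        · simp [hv]
      · have hne : bm.values.count prev ≠ 1 := by
          intro h1'
          apply hz
          rw [g1 prev, if_pos rfl, h1']
          norm_num
        rw [if_neg hz, k1, h4]
        split_ifs with hv
        · subst hv; constructor <;> intro <;> omega
        · rfl
    have n2 : cm2.keys.Nodup := by
      rw [hcm2]; split_ifs with hz
      · exact nodup_keys_erase _ _ n1
      · exact n1
    have hupd : updA cm bm b c = cm2.insert c (cm2.getD c 0 + 1) := by
      rw [updA]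
      simp only [hcb, if_pos, ← hprev, ← hcm1, ← hcm2]
    rw [hupd]
    refine ⟨PySem.Dict.nodup_keys_insert _ _ _ n2, PySem.Dict.nodup_keys_insert _ _ _ h2, ?_, ?_⟩
    · intro v
      rw [PySem.Dict.getD_insert]
      have hev := hcnt v
      by_cases hvc : v = c
      · subst hvc
        rw [if_pos rfl, g2 v]
        rw [if_pos rfl] at hev
        by_cases hp : v = prev
        · rw [if_pos hp]
          rw [if_pos hp.symm] at hev
          rw [← hp] at hprevpos ⊢
          omega
        · rw [if_neg hp]
          rw [if_neg (fun h : prev = v => hp h.symm)] at hev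
          omega
      · rw [if_neg hvc, g2 v]
        rw [if_neg (fun h : c = v => hvc h.symm)] at hev
        by_cases hp : v = prev
        · rw [if_pos hp]
          rw [if_pos hp.symm] at hev
          rw [← hp] at hprevpos ⊢
          omega
        · rw [if_neg hp]
          rw [if_neg (fun h : prev = v => hp h.symm)] at hev
          omega
    · intro v
      rw [PySem.Dict.mem_keys_insert, k2]
      have hev := hcnt v
      by_cases hvc : v = c
      · subst hvc
        rw [if_pos rfl] at hev
        simp only [true_or, true_iff]
        by_cases hp : v = prev
        · rw [if_pos hp.symm] at hev
          rw [← hp] at hprevpos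
          omega
        · rw [if_neg (fun h : prev = v => hp h.symm)] at hev
          omega
      · rw [or_iff_right hvc]
        rw [if_neg (fun h : c = v => hvc h.symm)] at hev
        by_cases hp : v = prev
        · rw [if_pos hp]
          rw [if_pos hp.symm] at hev
          rw [← hp] at hprevpos ⊢
          constructor <;> intro <;> omega
        · rw [if_neg hp]
          rw [if_neg (fun h : prev = v => hp h.symm)] at hev
          constructor <;> intro <;> omega
  · -- fresh case
    have hcb' : bm.contains b = false := by simpa using hcb
    have hcnt := fun v => count_values_insert_fresh bm b c v hcb'
    have hupd : updA cm bm b c = cm.insert c (cm.getD c 0 + 1) := by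
      rw [updA]; simp only [hcb', Bool.false_eq_true, ite_false]
    rw [hupd]
    refine ⟨PySem.Dict.nodup_keys_insert _ _ _ h1, PySem.Dict.nodup_keys_insert _ _ _ h2, ?_, ?_⟩
    · intro v
      rw [PySem.Dict.getD_insert, hcnt v]
      by_cases hvc : v = c
      · subst hvc
        rw [if_pos rfl, if_pos rfl, h3]
        push_cast; ring
      · rw [if_neg hvc, if_neg (fun h : c = v => hvc h.symm), h3]
        simp
    · intro v
      rw [PySem.Dict.mem_keys_insert, h4, hcnt v]
      by_cases hvc : v = c
      · subst hvc
        simp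
      · rw [or_iff_right hvc, if_neg (fun h : c = v => hvc h.symm)]
        simp

theorem Inv_empty : InvAB PySem.Dict.empty PySem.Dict.empty := by
  refine ⟨?_, ?_, ?_, ?_⟩ <;>
    simp [PySem.Dict.empty, PySem.Dict.keys, PySem.Dict.values, PySem.Dict.getD, PySem.Dict.get?]

theorem size_of_Inv (cm bm : PySem.Dict Int Int) (h : InvAB cm bm) :
    cm.size = (PySem.Set.ofList bm.values).length := by
  obtain ⟨h1, _, _, h4⟩ := h
  have hperm : cm.keys.Perm (PySem.Set.ofList bm.values) := by
    rw [List.perm_ext_iff_of_nodup h1 (PySem.Set.nodup_ofList _)]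
    intro a
    rw [h4 a, PySem.Set.mem_ofList, List.count_pos_iff]
  calc cm.size = cm.keys.length := by simp [PySem.Dict.size, PySem.Dict.keys]
    _ = _ := hperm.length_eq

theorem foldl_stepB_out (qs : List (List Int)) (bm : PySem.Dict Int Int) (out : List Int) :
    (qs.foldl stepB (bm, out)).2 = out ++ (qs.foldl stepB (bm, []) ).2 := by
  induction qs generalizing bm out with
  | nil => simp
  | cons q qs ih =>
    match q with
    | [b, c] =>
      simp only [List.foldl_cons, stepB]
      rw [ih, ih (bm.insert b c) ([] ++ [_])]
      simp
    | [] => simpa [stepB] using ih bm out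
    | [_] => simpa [stepB] using ih bm out
    | _ :: _ :: _ :: _ => simpa [stepB] using ih bm out

theorem set_append_len (l1 l2 : List Int) (a v : Int) :
    (l1 ++ a :: l2).set l1.length v = l1 ++ v :: l2 := by
  induction l1 with
  | nil => rfl
  | cons x t ih => simp [List.set_cons_succ, ih]

theorem loopA (qs : List (List Int)) (done : List Int) (cm bm : PySem.Dict Int Int)
    (hq : ∀ q ∈ qs, q.length = 2) (hInv : InvAB cm bm) :
    ((PySem.List.enumerate qs (done.length : Int)).foldl stepA
        (done ++ List.replicate qs.length 0, cm, bm)).1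
      = done ++ (qs.foldl stepB (bm, [])).2 := by
  induction qs generalizing done cm bm with
  | nil => simp [PySem.List.enumerate_nil]
  | cons q qs ih =>
    obtain ⟨b, c, rfl⟩ : ∃ b c, q = [b, c] := by
      have h2 := hq q (List.mem_cons_self)
      match q, h2 with
      | [b, c], _ => exact ⟨b, c, rfl⟩
    rw [PySem.List.enumerate_cons, List.foldl_cons]
    have hstep : stepA (done ++ List.replicate ([b, c] :: qs).length 0, cm, bm)
        ((done.length : Int), [b, c])
        = ((done ++ [((updA cm bm b c).size : Int)]) ++ List.replicate qs.length 0,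
           updA cm bm b c, bm.insert b c) := by
      simp only [stepA, List.length_cons, List.replicate_succ]
      rw [PySem.List.pySetD_natCast, set_append_len]
      simp
    rw [hstep]
    have hlen : (done.length : Int) + 1 = ((done ++ [((updA cm bm b c).size : Int)]).length : Int) := by
      simp
    rw [hlen, ih _ _ _ (fun q hq' => hq q (List.mem_cons_of_mem _ hq')) (Inv_upd cm bm b c hInv)]
    have hsz : ((updA cm bm b c).size : Int)
        = ((PySem.Set.ofList (bm.insert b c).values).length : Int) := by
      exact_mod_cast size_of_Inv _ _ (Inv_upd cm bm b c hInv)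
    simp only [List.foldl_cons, stepB]
    rw [foldl_stepB_out qs (bm.insert b c)
      ([] ++ [((PySem.Set.ofList (bm.insert b c).values).length : Int)]), hsz]
    simp

-- ===== VERDICT (by name: the statement is the Claim_ definition above) =====
theorem queryResults_spec : Claim_equal_queryResults := by
  intro limit queries _ hpre
  unfold Spec_queryResults queryResults queryResults_alt
  have := loopA queries [] PySem.Dict.empty PySem.Dict.empty hpre Inv_empty
  simpa using this
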